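-- pv_equiv track=rewrite | github.com/Dianshu-Liao/JUnitGenie | experiment_code/step_6_refine_runtime_error.py | extract_test_blocks
-- ===== SOURCE A (Python) =====
-- def extract_test_blocks(log: str):
--     blocks = {}
--     current_name = None
--     current_lines = []
--
--     for line in log.splitlines():
--         # Beginning of Block
--         if line.startswith("[INFO] Running "):
--             # Save the previous block (including case error reporting)
--             if current_name and current_lines:
--                 blocks[current_name] = '\n'.join(current_lines).strip()
--
--             current_name = line[len("[INFO] Running "):].strip()
--             current_lines = [line]
--
--         # New block not started but in current block
--         elif current_name:
--             current_lines.append(line)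
--
--     # Process the last block
--     if current_name and current_lines:
--         blocks[current_name] = '\n'.join(current_lines).strip()
--
--     return blocks
-- ===== SOURCE B (Python) =====
-- def extract_test_blocks(log: str):
--     # Two-phase: first split the lines into segments at "[INFO] Running " boundaries,
--     # then build the dict from the segments.
--     lines = log.splitlines()
--     # drop preamble lines before the first boundary
--     rest = lines
--     while rest and not rest[0].startswith("[INFO] Running "):
--         rest = rest[1:]
--     # cut into segments, each headed by a boundary line
--     segments = []
--     while rest:
--         head, rest = rest[0], rest[1:]
--         seg = [head]
--         while rest and not rest[0].startswith("[INFO] Running "):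
--             seg.append(rest[0])
--             rest = rest[1:]
--         segments.append(seg)
--     blocks = {}
--     for seg in segments:
--         name = seg[0][len("[INFO] Running "):].strip()
--         if name:
--             blocks[name] = '\n'.join(seg).strip()
--     return blocks
-- ===== Notes on version B (the rewrite author's own statement) =====
-- stated objective: alternative
-- what changed: A builds blocks in one pass with a mutable accumulator (current_name/current_lines, saving the previous block when the next boundary arrives); B is a two-phase decomposition: first cut the line list into boundary-headed segments, then build the dict from each segment's head and body.
import Mathlib
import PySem

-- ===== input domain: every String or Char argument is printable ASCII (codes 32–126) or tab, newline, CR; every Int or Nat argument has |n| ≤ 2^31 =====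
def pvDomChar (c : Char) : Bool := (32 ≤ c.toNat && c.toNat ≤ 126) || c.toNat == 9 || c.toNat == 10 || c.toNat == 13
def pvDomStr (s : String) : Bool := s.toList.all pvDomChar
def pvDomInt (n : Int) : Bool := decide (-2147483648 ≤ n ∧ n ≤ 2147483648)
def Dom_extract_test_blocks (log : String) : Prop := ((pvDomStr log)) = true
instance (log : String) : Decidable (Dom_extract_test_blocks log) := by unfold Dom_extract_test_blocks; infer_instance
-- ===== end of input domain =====

-- B replaces A's one-pass accumulator (previous block saved when the next boundary arrives)
-- by a two-phase decomposition — segment the lines at boundaries first, then build the dict —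
-- objective: simpler/alternative structure, same cost.

-- shared vocabulary of both Pythons (same literal expressions in Source A and Source B)
def pvIsStart (line : String) : Bool := PySem.Str.startswith line "[INFO] Running "

-- line[len("[INFO] Running "):].strip()   (len("[INFO] Running ") = 15)
def pvName (line : String) : String := PySem.Str.strip (PySem.Str.slice line (some 15) none)

-- ===== PORT A =====
-- "if current_name and current_lines: blocks[current_name] = '\n'.join(current_lines).strip()"
def pvSaveA (blocks : PySem.Dict String String) (cname : Option String) (clines : List String) :
    PySem.Dict String String :=
  match cname with
  | some n => if n ≠ "" ∧ clines ≠ [] then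
                blocks.insert n (PySem.Str.strip (PySem.Str.join "\n" clines))
              else blocks
  | none => blocks

-- the body of A's for-loop; state = (blocks, current_name, current_lines)
def pvStepA (st : PySem.Dict String String × Option String × List String) (line : String) :
    PySem.Dict String String × Option String × List String :=
  if pvIsStart line then
    (pvSaveA st.1 st.2.1 st.2.2, some (pvName line), [line])
  else
    match st.2.1 with                      -- "elif current_name:" (None or '' is falsy)
    | some n => if n ≠ "" then (st.1, some n, st.2.2 ++ [line]) else st
    | none => st

def extract_test_blocks (log : String) : List (String × String) :=
  let st := (PySem.Str.splitlines log).foldl pvStepA (PySem.Dict.empty, none, [])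
  (pvSaveA st.1 st.2.1 st.2.2).items

-- ===== PORT B =====
-- "while rest and not rest[0].startswith(...): rest = rest[1:]"
def pvDropPre : List String → List String
  | [] => []
  | x :: xs => if pvIsStart x then x :: xs else pvDropPre xs

-- the inner while: collect lines up to (not including) the next boundary
def pvSpan : List String → List String × List String
  | [] => ([], [])
  | x :: xs => if pvIsStart x then ([], x :: xs)
               else ((x :: (pvSpan xs).1), (pvSpan xs).2)

theorem pvSpan_snd_length_le : ∀ l : List String, (pvSpan l).2.length ≤ l.length := by
  intro l
  induction l with
  | nil => simp [pvSpan]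
  | cons x xs ih =>
    by_cases h : pvIsStart x = true
    · simp [pvSpan, h]
    · simp only [pvSpan, h, Bool.false_eq_true, if_false]
      exact Nat.le_succ_of_le ih

-- the outer while: cut rest into segments, each headed by a boundary line
def pvSegs : List String → List (List String)
  | [] => []
  | h :: t => (h :: (pvSpan t).1) :: pvSegs (pvSpan t).2
termination_by l => l.length
decreasing_by
  exact Nat.lt_succ_of_le (pvSpan_snd_length_le t)

-- "for seg in segments: ..." (seg is never empty as built, so the [] arm is unreachable)
def pvSegStep (blocks : PySem.Dict String String) (seg : List String) : PySem.Dict String String :=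
  match seg with
  | [] => blocks
  | h :: _ => if pvName h ≠ "" then
                blocks.insert (pvName h) (PySem.Str.strip (PySem.Str.join "\n" seg))
              else blocks

def extract_test_blocks_alt (log : String) : List (String × String) :=
  ((pvSegs (pvDropPre (PySem.Str.splitlines log))).foldl pvSegStep PySem.Dict.empty).items

-- ===== PRECONDITION & SPEC =====
def Spec_extract_test_blocks (log : String) (out : List (String × String)) : Prop := out = extract_test_blocks_alt log
instance (log : String) (out : List (String × String)) : Decidable (Spec_extract_test_blocks log out) := by unfold Spec_extract_test_blocks; infer_instance

-- ===== CLAIM (what is proved, stated in full; the proofs are below) =====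
def Claim_equal_extract_test_blocks : Prop := ∀ (log : String), Dom_extract_test_blocks log → Spec_extract_test_blocks log (extract_test_blocks log)

-- ===== LEMMAS AND PROOFS =====

-- B's per-segment step on a nonempty segment is exactly A's save of that segment
theorem pvSegStep_eq_save (b : PySem.Dict String String) (h : String) (cl : List String) :
    pvSegStep b (h :: cl) = pvSaveA b (some (pvName h)) (h :: cl) := by
  by_cases hn : pvName h = "" <;> simp [pvSegStep, pvSaveA, hn]

-- a segment with empty name is skipped
theorem pvSegStep_empty (b : PySem.Dict String String) (h : String) (cl : List String)
    (hn : pvName h = "") : pvSegStep b (h :: cl) = b := by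
  simp [pvSegStep, hn]

-- invariant of A's loop while a block (headed by h, name pvName h) is open
theorem pv_main : ∀ (lines : List String) (b : PySem.Dict String String) (h : String) (cl : List String),
    pvSaveA (lines.foldl pvStepA (b, some (pvName h), h :: cl)).1
        (lines.foldl pvStepA (b, some (pvName h), h :: cl)).2.1
        (lines.foldl pvStepA (b, some (pvName h), h :: cl)).2.2
    = ((h :: (cl ++ (pvSpan lines).1)) :: pvSegs (pvSpan lines).2).foldl pvSegStep b := by
  intro lines
  induction lines with
  | nil =>
    intro b h cl
    simp only [List.foldl_nil, pvSpan, pvSegs, List.append_nil, List.foldl_cons]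
    rw [pvSegStep_eq_save]
  | cons x xs ih =>
    intro b h cl
    rw [List.foldl_cons]
    by_cases hs : pvIsStart x = true
    · -- boundary: save current block, open a new block headed by x
      have hstep : pvStepA (b, some (pvName h), h :: cl) x
          = (pvSaveA b (some (pvName h)) (h :: cl), some (pvName x), [x]) := by
        simp [pvStepA, hs]
      rw [hstep]
      have hih := ih (pvSaveA b (some (pvName h)) (h :: cl)) x []
      simp only [List.nil_append] at hih
      rw [hih]
      simp only [pvSpan, hs, if_pos]
      rw [pvSegs]
      simp only [List.append_nil, List.foldl_cons]
      simp only [pvSegStep_eq_save]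
    · by_cases hn : pvName h = ""
      · -- empty name: A drops the line; B's whole segment is skipped anyway
        have hstep : pvStepA (b, some (pvName h), h :: cl) x = (b, some (pvName h), h :: cl) := by
          simp [pvStepA, hs, hn]
        rw [hstep, ih b h cl]
        simp only [pvSpan, hs, Bool.false_eq_true, if_false, List.foldl_cons]
        rw [pvSegStep_empty b _ _ hn, pvSegStep_empty b _ _ hn]
      · -- append the line to the open block
        have hstep : pvStepA (b, some (pvName h), h :: cl) x = (b, some (pvName h), h :: cl ++ [x]) := by
          simp [pvStepA, hs, hn]
        rw [hstep]
        have hih := ih b h (cl ++ [x])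
        simp only [List.cons_append, List.append_assoc, List.nil_append] at hih ⊢
        rw [hih]
        simp only [pvSpan, hs, Bool.false_eq_true, if_false]

-- the preamble phase: state (blocks, None, []) skips lines until a boundary
theorem pv_pre : ∀ (lines : List String) (b : PySem.Dict String String),
    pvSaveA (lines.foldl pvStepA (b, none, [])).1
        (lines.foldl pvStepA (b, none, [])).2.1
        (lines.foldl pvStepA (b, none, [])).2.2
    = (pvSegs (pvDropPre lines)).foldl pvSegStep b := by
  intro lines
  induction lines with
  | nil => intro b; simp [pvSaveA, pvSegs, pvDropPre]
  | cons x xs ih =>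
    intro b
    rw [List.foldl_cons]
    by_cases hs : pvIsStart x = true
    · have hstep : pvStepA (b, none, []) x = (b, some (pvName x), [x]) := by
        simp [pvStepA, hs, pvSaveA]
      rw [hstep]
      have hih := pv_main xs b x []
      simp only [List.nil_append] at hih
      rw [hih]
      simp only [pvDropPre, hs, if_pos]
      rw [pvSegs]
    · have hstep : pvStepA (b, none, []) x = (b, none, []) := by
        simp [pvStepA, hs]
      rw [hstep, ih b]
      simp only [pvDropPre, hs, Bool.false_eq_true, if_false]

-- ===== VERDICT (by name: the statement is the Claim_ definition above) =====
theorem extract_test_blocks_spec : Claim_equal_extract_test_blocks := by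
  intro log _
  unfold Spec_extract_test_blocks extract_test_blocks extract_test_blocks_alt
  exact congrArg PySem.Dict.items (pv_pre (PySem.Str.splitlines log) PySem.Dict.empty)
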